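-- pv_equiv track=rewrite | github.com/ASSERT-KTH/Mokav | experiments/pynguin/c4b/return-lst/generated_tests/src_2670/5/src_2670.py | func
-- ===== SOURCE A (Python) =====
-- def func(*args):
-- 	ret_values = []
--
-- 	a = args[0]
-- 	b = args[1].split('0')
-- 	ans = ([0] * len(b))
-- 	for i in range(len(b)):
-- 	    ans[i] = str(len(b[i]))
-- 	ret_values.append(''.join(ans))
--
-- 	return ret_values
-- ===== SOURCE B (Python) =====
-- def func(*args):
--     a = args[0]
--     s = args[1]
--     parts = []
--     count = 0
--     for ch in s:
--         if ch == '0':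
--             parts.append(str(count))
--             count = 0
--         else:
--             count += 1
--     parts.append(str(count))
--     return [''.join(parts)]
-- ===== Notes on version B (the rewrite author's own statement) =====
-- stated objective: alternative
-- what changed: Replaces split('0') plus an index-loop that builds a preallocated array of segment-length strings with a single left-to-right scan keeping a run-length counter, appending str(counter) at each '0' and once at the end.
import Mathlib
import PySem

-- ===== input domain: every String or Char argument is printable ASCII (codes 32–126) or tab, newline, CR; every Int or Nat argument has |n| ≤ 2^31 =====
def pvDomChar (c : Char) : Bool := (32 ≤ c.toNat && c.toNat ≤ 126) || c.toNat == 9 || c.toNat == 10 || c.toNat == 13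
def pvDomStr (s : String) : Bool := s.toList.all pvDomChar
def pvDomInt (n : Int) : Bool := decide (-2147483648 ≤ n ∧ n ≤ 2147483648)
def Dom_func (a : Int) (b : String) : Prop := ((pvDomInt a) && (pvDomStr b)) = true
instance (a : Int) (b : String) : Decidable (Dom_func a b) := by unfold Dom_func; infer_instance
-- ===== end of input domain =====

-- B replaces split('0') + an index loop filling a preallocated array with a single scan
-- carrying a run-length counter (alternative decomposition, same cost).

-- ===== PORT A =====
-- A: b.split('0'); ans = [0]*len(b); for i in range(len(b)): ans[i] = str(len(b[i])); return [''.join(ans)]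
-- (ans's Python placeholder is the int 0; every slot is overwritten before use, so the
--  placeholder is ported as the string "" — it never reaches the result.)
def func (a : Int) (b : String) : List String :=
  let retValues : List String := []
  let bParts : List (List Char) := PySem.Chars.splitOn b.toList ['0']
  let ans : List String :=
    (PySem.List.pyRange 0 (bParts.length : Int)).foldl
      (fun ans i =>
        ans.set i.toNat (PySem.Int.toStr ((PySem.List.pyGetD bParts i []).length : Int)))
      (List.replicate bParts.length "")
  retValues ++ [PySem.Str.join "" ans]

-- ===== PORT B =====
-- B: one scan over the string; append str(count) on each '0', reset; append final count.
def func_alt (a : Int) (b : String) : List String :=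
  let st : List String × Nat :=
    b.toList.foldl
      (fun st ch =>
        if ch == '0' then (st.1 ++ [PySem.Int.toStr (st.2 : Int)], 0)
        else (st.1, st.2 + 1))
      ([], 0)
  [PySem.Str.join "" (st.1 ++ [PySem.Int.toStr (st.2 : Int)])]

-- ===== PRECONDITION & SPEC =====
def Spec_func (a : Int) (b : String) (out : List String) : Prop := out = func_alt a b
instance (a : Int) (b : String) (out : List String) : Decidable (Spec_func a b out) := by unfold Spec_func; infer_instance

-- ===== CLAIM (what is proved, stated in full; the proofs are below) =====
def Claim_equal_func : Prop := ∀ (a : Int) (b : String), Dom_func a b → Spec_func a b (func a b)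

-- ===== LEMMAS AND PROOFS =====

-- splitOn.go with a non-empty accumulator: the reversed accumulator is a prefix of the result.
theorem go_acc (fuel : Nat) : ∀ (l cur : List Char) (acc : List (List Char)),
    PySem.Chars.splitOn.go ['0'] fuel l cur acc
      = acc.reverse ++ PySem.Chars.splitOn.go ['0'] fuel l cur [] := by
  induction fuel with
  | zero => intro l cur acc; simp [PySem.Chars.splitOn.go]
  | succ n ih =>
    intro l cur acc
    cases l with
    | nil => simp [PySem.Chars.splitOn.go]
    | cons c rest =>
      rw [PySem.Chars.splitOn.go, PySem.Chars.splitOn.go]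
      by_cases h : List.isPrefixOf ['0'] (c :: rest) = true
      · simp only [h, if_true]
        rw [ih _ _ (cur.reverse :: acc), ih _ _ [cur.reverse]]
        simp
      · simp only [h]
        exact ih _ _ acc

-- splitOn.go with a non-empty current segment: the segment-in-progress heads the first piece.
theorem go_cur (fuel : Nat) : ∀ (l cur : List Char),
    ∃ h t, PySem.Chars.splitOn.go ['0'] fuel l [] [] = h :: t ∧
      PySem.Chars.splitOn.go ['0'] fuel l cur [] = (cur.reverse ++ h) :: t := by
  induction fuel with
  | zero => intro l cur; exact ⟨l, [], by simp [PySem.Chars.splitOn.go]⟩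
  | succ n ih =>
    intro l cur
    cases l with
    | nil => exact ⟨[], [], by simp [PySem.Chars.splitOn.go]⟩
    | cons c rest =>
      rw [PySem.Chars.splitOn.go, PySem.Chars.splitOn.go]
      by_cases h : List.isPrefixOf ['0'] (c :: rest) = true
      · simp only [h, if_true]
        rw [go_acc n _ [] [List.reverse cur], go_acc n _ [] [List.reverse []]]
        refine ⟨[], PySem.Chars.splitOn.go ['0'] n (List.drop ['0'].length (c :: rest)) [] [], by simp, by simp⟩
      · simp only [h, Bool.false_eq_true, if_false]
        obtain ⟨hd, t, h1, h2⟩ := ih rest (c :: cur)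
        obtain ⟨hd', t', h1', h2'⟩ := ih rest [c]
        injection h1.symm.trans h1' with e1 e2
        subst e1; subst e2
        refine ⟨c :: hd, t, h2', ?_⟩
        rw [h2]; simp

-- splitOn with separator "0": structural equations.
theorem splitOn_nil : PySem.Chars.splitOn [] ['0'] = [[]] := by decide

-- splitOn never returns the empty list
theorem splitOn_exists (cs : List Char) :
    ∃ h t, PySem.Chars.splitOn cs ['0'] = h :: t := by
  obtain ⟨h, t, h1, _⟩ := go_cur (cs.length + 1) cs []
  exact ⟨h, t, by rw [PySem.Chars.splitOn]; exact h1⟩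

theorem splitOn_zero (cs : List Char) :
    PySem.Chars.splitOn ('0' :: cs) ['0'] = [] :: PySem.Chars.splitOn cs ['0'] := by
  rw [PySem.Chars.splitOn, PySem.Chars.splitOn]
  rw [PySem.Chars.splitOn.go]
  simp only [List.length_cons]
  rw [show List.isPrefixOf ['0'] ('0' :: cs) = true by simp [List.isPrefixOf]]
  simp only [if_true]
  rw [go_acc (cs.length + 1) _ _ [List.reverse []]]
  simp

theorem splitOn_cons (c : Char) (cs : List Char) (hc : c ≠ '0') :
    ∃ h t, PySem.Chars.splitOn cs ['0'] = h :: t ∧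
      PySem.Chars.splitOn (c :: cs) ['0'] = (c :: h) :: t := by
  rw [PySem.Chars.splitOn, PySem.Chars.splitOn]
  rw [PySem.Chars.splitOn.go]
  simp only [List.length_cons]
  rw [show List.isPrefixOf ['0'] (c :: cs) = false by
    simp [List.isPrefixOf]; exact fun h => hc h.symm]
  simp only [Bool.false_eq_true, if_false]
  obtain ⟨h, t, h1, h2⟩ := go_cur (cs.length + 1) cs [c]
  exact ⟨h, t, h1, by rw [h2]; simp⟩

-- the B-side fold, characterised against splitOn
theorem fold_char (cs : List Char) : ∀ (acc : List String) (k : Nat) (h : List Char) (t : List (List Char)),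
    PySem.Chars.splitOn cs ['0'] = h :: t →
    (let st := cs.foldl
        (fun (st : List String × Nat) (ch : Char) =>
          if ch == '0' then (st.1 ++ [PySem.Int.toStr (st.2 : Int)], 0)
          else (st.1, st.2 + 1)) (acc, k)
     st.1 ++ [PySem.Int.toStr (st.2 : Int)])
      = acc ++ PySem.Int.toStr ((k + h.length : Nat) : Int)
          :: t.map (fun s => PySem.Int.toStr ((s.length : Nat) : Int)) := by
  induction cs with
  | nil =>
    intro acc k h t hs
    rw [splitOn_nil] at hs
    injection hs with e1 e2
    subst e1; subst e2
    simp
  | cons c cs ih =>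
    intro acc k h t hs
    by_cases hc : c = '0'
    · subst hc
      obtain ⟨h', t', h1⟩ := splitOn_exists cs
      rw [splitOn_zero, h1] at hs
      injection hs with e1 e2
      subst e1; subst e2
      have hih := ih (acc ++ [PySem.Int.toStr (k : Int)]) 0 h' t' h1
      simp only [List.foldl_cons, beq_self_eq_true, if_true] at hih ⊢
      rw [hih]; simp
    · obtain ⟨h', t', h1, h2⟩ := splitOn_cons c cs hc
      rw [h2] at hs
      injection hs with e1 e2
      subst e1; subst e2
      have hih := ih acc (k + 1) h' t' h1
      simp only [List.foldl_cons, hc, beq_iff_eq, if_false] at hih ⊢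
      rw [hih]
      have harith : (k + 1) + h'.length = k + (c :: h').length := by
        simp only [List.length_cons]; omega
      rw [harith]

-- A's fill-by-index loop over range(len) is a map over the indices
theorem fill_loop (g : Int → String) : ∀ (n : Nat) (init : List String), n ≤ init.length →
    (PySem.List.pyRange 0 (n : Int)).foldl
        (fun ans i => ans.set i.toNat (g i)) init
      = (List.range n).map (fun (i : Nat) => g (i : Int)) ++ init.drop n := by
  intro n
  induction n with
  | zero => intro init _; simp [PySem.List.pyRange]
  | succ n ih =>
    intro init hlen
    have hcast : ((n + 1 : Nat) : Int) = (n : Int) + 1 := by push_cast; ring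
    rw [hcast, PySem.List.pyRange_one_succ_right (by positivity), List.foldl_append]
    rw [ih init (by omega)]
    simp only [List.foldl_cons, List.foldl_nil]
    have hn : n < init.length := by omega
    rw [List.set_append]
    have hml : ((List.range n).map (fun (i : Nat) => g (i : Int))).length = n := by simp
    rw [hml]
    rw [Int.toNat_natCast, if_neg (Nat.lt_irrefl n), Nat.sub_self]
    rw [List.drop_eq_getElem_cons hn, List.set_cons_zero, List.range_succ]
    simp

-- reading parts[i] over range(len(parts)) is just a map over parts
theorem range_map_parts (parts : List (List Char)) :
    (List.range parts.length).map
        (fun (i : Nat) => PySem.Int.toStr (((PySem.List.pyGetD parts (i : Int) []).length : Nat) : Int))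
      = parts.map (fun s => PySem.Int.toStr ((s.length : Nat) : Int)) := by
  apply List.ext_getElem
  · simp
  · intro i h1 h2
    simp only [List.getElem_map, List.getElem_range]
    congr 2
    have hi : i < parts.length := by simpa using h2
    rw [PySem.List.pyGetD_natCast, List.getD_eq_getElem parts [] hi]

-- ===== VERDICT (by name: the statement is the Claim_ definition above) =====
theorem func_spec : Claim_equal_func := by
  intro a b _
  unfold Spec_func func func_alt
  simp only [List.nil_append]
  obtain ⟨h, t, hs⟩ := splitOn_exists b.toList
  have hB := fold_char b.toList [] 0 h t hs
  rw [hB]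
  have hA := fill_loop
    (fun i => PySem.Int.toStr (((PySem.List.pyGetD (PySem.Chars.splitOn b.toList ['0']) i []).length : Nat) : Int))
    (PySem.Chars.splitOn b.toList ['0']).length
    (List.replicate (PySem.Chars.splitOn b.toList ['0']).length "")
    (by simp)
  rw [hA, range_map_parts]
  rw [hs]
  simp
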